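-- pv_equiv track=rewrite | github.com/Andeser-rgb/Esercizi-PA | divide_and_conquer/problema1.py | solve
-- ===== SOURCE A (Python) =====
-- from typing import List
--
-- def solve(a: List[int], s: int, d: int):
--     if s == d:
--         if a[s] >= 0:
--             return 1
--         else:
--             return 0
--     c = int((s + d)/2)
--     s1 = solve(a, s, c)
--     s2 = solve(a, c + 1, d)
--     return s1 + s2
-- ===== SOURCE B (Python) =====
-- def solve(a, s, d):
--     # count the inclusive right endpoint once, then scan forward from s to d
--     count = int(a[d] >= 0)
--     i = s
--     while i != d:
--         count += a[i] >= 0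
--         i += 1
--     return count
-- ===== Notes on version B (the rewrite author's own statement) =====
-- stated objective: simpler
-- what changed: Replaces the recursive divide-and-conquer with a flat forward scan: count the inclusive endpoint a[d] once, then a single while-loop from s to d adding the boolean a[i] >= 0 to one counter.
import Mathlib
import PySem

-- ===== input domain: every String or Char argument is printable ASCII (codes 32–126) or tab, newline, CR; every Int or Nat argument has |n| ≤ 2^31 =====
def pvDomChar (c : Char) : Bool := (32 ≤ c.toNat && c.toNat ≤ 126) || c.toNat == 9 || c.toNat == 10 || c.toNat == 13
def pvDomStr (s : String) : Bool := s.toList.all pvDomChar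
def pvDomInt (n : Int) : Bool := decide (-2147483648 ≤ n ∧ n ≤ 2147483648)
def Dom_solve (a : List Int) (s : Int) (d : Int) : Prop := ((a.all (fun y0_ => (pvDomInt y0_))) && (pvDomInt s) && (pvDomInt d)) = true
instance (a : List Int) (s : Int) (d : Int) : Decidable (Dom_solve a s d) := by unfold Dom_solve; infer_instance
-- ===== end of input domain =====

-- B replaces A's recursive divide-and-conquer count with a flat forward scan: the inclusive
-- endpoint a[d] is counted once, then a while-loop from s to d adds the boolean a[i] >= 0
-- to one counter (return value only, no mutation).

-- ===== PORT A =====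
-- A recurses on (s,d); the port carries fuel to make the recursion structural.  Inside
-- Pre_solve the recursion depth is at most (d - s).toNat + 1, so the fuel is never exhausted there.
-- 'int((s + d)/2)' is float division truncated toward zero; exact as Int.tdiv for |s+d| < 2^53 (Dom keeps |s|,|d| ≤ 2^31).
-- 'a[s]' is PySem.List.pyGet? (Python negative-index rule); '.getD 0' is unreachable inside Pre_solve (IndexError is excluded by Pre_).
def solveFuel (a : List Int) : Nat → Int → Int → Int
  | 0, _, _ => 0
  | fuel + 1, s, d =>
    if s = d then
      if 0 ≤ ((PySem.List.pyGet? a s).getD 0) then 1 else 0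
    else
      let c := Int.tdiv (s + d) 2
      let s1 := solveFuel a fuel s c
      let s2 := solveFuel a fuel (c + 1) d
      s1 + s2

def solve (a : List Int) (s : Int) (d : Int) : Int :=
  solveFuel a ((d - s).toNat + 1) s d

-- ===== PORT B =====
-- count = int(a[d] >= 0); i = s; while i != d: count += a[i] >= 0; i += 1; return count
-- pyBool is Python's int(bool) / bool-as-int arithmetic; 'a[d]'/'a[i]' are PySem.List.pyGet?
-- ('.getD 0' is unreachable inside Pre_solve: IndexError is excluded by Pre_).  The while-loop
-- runs exactly (d - s) iterations wherever the Python B returns; the fuel only makes it structural.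
def pyBool (b : Bool) : Int := if b then 1 else 0

def altScan (a : List Int) (d : Int) : Nat → Int → Int → Int
  | 0, _, count => count
  | fuel + 1, i, count =>
    if i = d then count
    else altScan a d fuel (i + 1) (count + pyBool (0 ≤ ((PySem.List.pyGet? a i).getD 0)))

def solve_alt (a : List Int) (s : Int) (d : Int) : Int :=
  altScan a d ((d - s).toNat + 1) s (pyBool (0 ≤ ((PySem.List.pyGet? a d).getD 0)))

-- ===== PRECONDITION & SPEC =====
-- Exactly the inputs on which the Python A returns: either a non-negative in-range segment
-- s ≤ d, or a single index s = d valid under Python's negative-index rule.  Elsewhere A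
-- raises (IndexError, or RecursionError from infinite recursion, e.g. whenever d < s).
def Pre_solve (a : List Int) (s : Int) (d : Int) : Prop :=
  (0 ≤ s ∧ s ≤ d ∧ d < (a.length : Int)) ∨
  (s = d ∧ -(a.length : Int) ≤ s ∧ s < (a.length : Int))
instance (a : List Int) (s : Int) (d : Int) : Decidable (Pre_solve a s d) := by
  unfold Pre_solve; infer_instance

def pvWitness_solve : List Int × Int × Int := ([3, -1, 0, 7], 1, 3)

def Spec_solve (a : List Int) (s : Int) (d : Int) (out : Int) : Prop := out = solve_alt a s d
instance (a : List Int) (s : Int) (d : Int) (out : Int) : Decidable (Spec_solve a s d out) := by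
  unfold Spec_solve; infer_instance

-- ===== CLAIM (what is proved, stated in full; the proofs are below) =====
def Claim_equal_solve : Prop := ∀ (a : List Int) (s : Int) (d : Int), Dom_solve a s d → Pre_solve a s d → Spec_solve a s d (solve a s d)

-- ===== LEMMAS AND PROOFS =====

-- Common yardstick: the 0/1-sum over the inclusive index range [s, d].
def segCount (a : List Int) (s d : Int) : Int :=
  ((PySem.List.pyRange s (d + 1) 1).map
    (fun i => if 0 ≤ ((PySem.List.pyGet? a i).getD 0) then (1 : Int) else 0)).sum

theorem segCount_singleton (a : List Int) (s : Int) :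
    segCount a s s = (if 0 ≤ ((PySem.List.pyGet? a s).getD 0) then (1 : Int) else 0) := by
  unfold segCount
  rw [PySem.List.pyRange_one_singleton]
  simp

-- segCount splits additively at any midpoint m of the inclusive range.
theorem segCount_split (a : List Int) (s m d : Int) (h1 : s ≤ m) (h2 : m ≤ d) :
    segCount a s d = segCount a s m + segCount a (m + 1) d := by
  unfold segCount
  rw [PySem.List.pyRange_one_append s (m + 1) (d + 1) (by omega) (by omega)]
  simp

-- A-side invariant: with enough fuel and a well-formed segment, A's recursion computes segCount.
theorem solveFuel_eq (a : List Int) (fuel : Nat) (s d : Int)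
    (hf : (d - s).toNat < fuel) (hsd : s ≤ d) (hs : 0 ≤ s) :
    solveFuel a fuel s d = segCount a s d := by
  induction fuel generalizing s d with
  | zero => omega
  | succ n ih =>
    by_cases hq : s = d
    · subst hq
      rw [segCount_singleton]
      simp [solveFuel]
    · have hlt : s < d := lt_of_le_of_ne hsd hq
      have hc : Int.tdiv (s + d) 2 = (s + d) / 2 := Int.tdiv_eq_ediv_of_nonneg (by omega)
      have hcs : s ≤ (s + d) / 2 := by omega
      have hcd : (s + d) / 2 < d := by omega
      rw [show solveFuel a (n + 1) s d =
            solveFuel a n s (Int.tdiv (s + d) 2) + solveFuel a n (Int.tdiv (s + d) 2 + 1) d by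
            simp [solveFuel, hq]]
      rw [hc]
      rw [ih s ((s + d) / 2) (by omega) hcs hs,
          ih ((s + d) / 2 + 1) d (by omega) (by omega) (by omega)]
      exact (segCount_split a s ((s + d) / 2) d hcs (le_of_lt hcd)).symm

-- B-side invariant: with enough fuel, the scan adds the 0/1-sum over [i, d) to its accumulator.
theorem altScan_eq (a : List Int) (d : Int) (fuel : Nat) (i count : Int)
    (hf : (d - i).toNat < fuel) (hid : i ≤ d) :
    altScan a d fuel i count =
      count + ((PySem.List.pyRange i d 1).map
        (fun j => if 0 ≤ ((PySem.List.pyGet? a j).getD 0) then (1 : Int) else 0)).sum := by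
  induction fuel generalizing i count with
  | zero => omega
  | succ n ih =>
    by_cases hq : i = d
    · subst hq
      simp [altScan, PySem.List.pyRange_one_eq_nil]
    · have hlt : i < d := lt_of_le_of_ne hid hq
      rw [show altScan a d (n + 1) i count =
            altScan a d n (i + 1) (count + pyBool (0 ≤ ((PySem.List.pyGet? a i).getD 0))) by
            simp [altScan, hq]]
      rw [ih (i + 1) _ (by omega) (by omega), PySem.List.pyRange_one_cons hlt]
      simp [pyBool]
      split_ifs <;> ring

-- On any segment with s ≤ d, B computes segCount: [s, d] is [s, d) plus the endpoint d.
theorem solve_alt_eq (a : List Int) (s d : Int) (h : s ≤ d) :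
    solve_alt a s d = segCount a s d := by
  unfold solve_alt segCount
  rw [altScan_eq a d _ s _ (by omega) h,
      PySem.List.pyRange_one_append s d (d + 1) h (by omega),
      PySem.List.pyRange_one_singleton]
  simp [pyBool]
  ring

-- ===== VERDICT (by name: the statement is the Claim_ definition above) =====
theorem solve_spec : Claim_equal_solve := by
  intro a s d _ hpre
  unfold Spec_solve solve
  rcases hpre with ⟨hs, hsd, _⟩ | ⟨hq, _, _⟩
  · rw [solve_alt_eq a s d hsd]
    exact solveFuel_eq a ((d - s).toNat + 1) s d (by omega) hsd hs
  · subst hq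
    rw [solve_alt_eq a s s le_rfl, segCount_singleton,
        show (s - s).toNat + 1 = 1 by omega]
    simp [solveFuel]
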